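-- pv_equiv track=rewrite | github.com/VituRamos/SistemasOperacionais | T1/TesteProcessos.py | calcular_tempos_finais
-- ===== SOURCE A (Python) =====
-- def calcular_tempos_finais(linha_tempo):
--     tempo = 0
--     processo_atual = None
--     linha_tempo_mod = []
--
--     #Gerar linha do tempo_final (semelhante ao "Formatar linha tempo")
--     for processo in linha_tempo:
--
--         if processo == processo_atual:
--             tempo += 1
--
--         else:
--
--             if processo_atual:
--
--                 linha_tempo_mod += [(processo_atual,tempo)]
--
--             processo_atual = processo
--             tempo += 1
--
--     if processo_atual:
--         linha_tempo_mod += [(processo_atual,tempo)]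
--
--
--     #Ordenar tempos em valores unicos para tupla = [(Tempo P1),(Tempo P2)...]
--     processo_nome = {}
--
--     #Para cada elemento em linha_tempo
--     for elemento in linha_tempo_mod:
--         string, valor = elemento
--
--         #Se string ja estiver em processo_nome
--         if string in processo_nome:
--
--             #Recebe maior valor em que a string se repete
--             processo_nome[string] = max(processo_nome[string], valor)
--
--         #Se string nao estiver em processo_nome
--         else:
--
--             #Processo_nome recebe valor
--             processo_nome[string] = valor
--
--     #Recebe tempo de cada processo
--     tempos = [(processo_nome[string]) for string in processo_nome]
--
--     return tempos
-- ===== SOURCE B (Python) =====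
-- def calcular_tempos_finais(linha_tempo):
--     # Last 1-based occurrence index per (truthy) process label, in first-appearance order.
--     last = {}
--     for i, processo in enumerate(linha_tempo, 1):
--         if processo:
--             last[processo] = i
--     return list(last.values())
-- ===== Notes on version B (the rewrite author's own statement) =====
-- stated objective: simpler
-- what changed: Replaces A's run-length-encoding pass plus a max-reduction dict with a single pass recording each truthy label's last 1-based index in an insertion-ordered dict (max = last occurrence since indices increase).
import Mathlib
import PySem

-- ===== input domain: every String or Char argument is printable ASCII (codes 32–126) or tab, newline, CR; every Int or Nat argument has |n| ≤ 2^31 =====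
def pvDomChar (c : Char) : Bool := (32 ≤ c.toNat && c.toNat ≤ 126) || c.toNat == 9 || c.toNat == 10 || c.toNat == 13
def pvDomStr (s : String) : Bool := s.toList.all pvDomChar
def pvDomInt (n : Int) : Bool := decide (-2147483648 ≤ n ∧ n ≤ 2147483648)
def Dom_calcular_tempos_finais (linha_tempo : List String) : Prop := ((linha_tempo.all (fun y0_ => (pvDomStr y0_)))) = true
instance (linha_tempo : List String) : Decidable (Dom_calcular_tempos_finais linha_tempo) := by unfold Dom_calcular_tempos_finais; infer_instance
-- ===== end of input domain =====

-- B replaces A's run-length-encoding pass and max-reduction dict with one pass recording each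
-- truthy label's last 1-based index (objective: simpler; same return value).

-- ===== PORT A =====
-- loop 1 state: (tempo, processo_atual, linha_tempo_mod)
def pvFinalA (st : Int × Option String × List (String × Int)) : List (String × Int) :=
  -- the 'if processo_atual: linha_tempo_mod += [(processo_atual, tempo)]' pattern
  match st.2.1 with
  | some s => if s ≠ "" then st.2.2 ++ [(s, st.1)] else st.2.2
  | none => st.2.2

def pvStepA (st : Int × Option String × List (String × Int)) (p : String) :
    Int × Option String × List (String × Int) :=
  if some p == st.2.1 then (st.1 + 1, st.2.1, st.2.2)
  else (st.1 + 1, some p, pvFinalA st)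

def pvMaxIns (d : PySem.Dict String Int) (e : String × Int) : PySem.Dict String Int :=
  match d.get? e.1 with
  | some old => d.insert e.1 (max old e.2)
  | none => d.insert e.1 e.2

def calcular_tempos_finais (linha_tempo : List String) : List Int :=
  let st := linha_tempo.foldl pvStepA (0, none, [])
  let linha_tempo_mod := pvFinalA st
  let processo_nome := linha_tempo_mod.foldl pvMaxIns PySem.Dict.empty
  processo_nome.values

-- ===== PORT B =====
def pvStepB (d : PySem.Dict String Int) (ip : Int × String) : PySem.Dict String Int :=
  if ip.2 ≠ "" then d.insert ip.2 ip.1 else d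

def calcular_tempos_finais_alt (linha_tempo : List String) : List Int :=
  ((PySem.List.enumerate linha_tempo 1).foldl pvStepB PySem.Dict.empty).values

-- ===== PRECONDITION & SPEC =====
def Spec_calcular_tempos_finais (linha_tempo : List String) (out : List Int) : Prop := out = calcular_tempos_finais_alt linha_tempo
instance (linha_tempo : List String) (out : List Int) : Decidable (Spec_calcular_tempos_finais linha_tempo out) := by unfold Spec_calcular_tempos_finais; infer_instance

-- ===== CLAIM (what is proved, stated in full; the proofs are below) =====
def Claim_equal_calcular_tempos_finais : Prop := ∀ (linha_tempo : List String), Dom_calcular_tempos_finais linha_tempo → Spec_calcular_tempos_finais linha_tempo (calcular_tempos_finais linha_tempo)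

-- ===== LEMMAS AND PROOFS =====

lemma pv_stepA_fst (st : Int × Option String × List (String × Int)) (p : String) :
    (pvStepA st p).1 = st.1 + 1 := by
  unfold pvStepA; split <;> rfl

lemma pv_foldA_fst (xs : List String) (st : Int × Option String × List (String × Int)) :
    (xs.foldl pvStepA st).1 = st.1 + xs.length := by
  induction xs generalizing st with
  | nil => simp
  | cons x xs ih => simp [List.foldl_cons, ih, pv_stepA_fst]; ring

lemma pv_main (xs : List String) :
    (pvFinalA (xs.foldl pvStepA (0, none, []))).foldl pvMaxIns PySem.Dict.empty
      = (PySem.List.enumerate xs 1).foldl pvStepB PySem.Dict.empty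
    ∧ ∀ s v, ((PySem.List.enumerate xs 1).foldl pvStepB PySem.Dict.empty).get? s = some v →
        v ≤ (xs.length : Int) := by
  induction xs using List.reverseRecOn with
  | nil => exact ⟨rfl, by intro s v h; simp [PySem.Dict.get?_empty] at h⟩
  | append_singleton xs a ih =>
    obtain ⟨ihe, ihb⟩ := ih
    set st := xs.foldl pvStepA (0, none, []) with hst
    have hfst : st.1 = (xs.length : Int) := by
      simpa using pv_foldA_fst xs (0, none, [])
    have henum : PySem.List.enumerate (xs ++ [a]) 1
        = PySem.List.enumerate xs 1 ++ [((1 + xs.length : Int), a)] := by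
      simp [PySem.List.enumerate_append, PySem.List.enumerate_cons]
    have hfoldA : (xs ++ [a]).foldl pvStepA (0, none, []) = pvStepA st a := by
      simp [List.foldl_append, hst]
    set dB := (PySem.List.enumerate xs 1).foldl pvStepB PySem.Dict.empty with hdB
    have hBnew : (PySem.List.enumerate (xs ++ [a]) 1).foldl pvStepB PySem.Dict.empty
        = pvStepB dB ((1 + xs.length : Int), a) := by
      rw [henum, List.foldl_append]; rfl
    by_cases ha : a = ""
    · -- falsy label: both sides unchanged
      subst ha
      have hBsame : pvStepB dB ((1 + xs.length : Int), "") = dB := by simp [pvStepB]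
      have hAnew : pvFinalA (pvStepA st "") = pvFinalA st := by
        unfold pvStepA
        by_cases hc : (some "" == st.2.1) = true
        · rw [if_pos hc]
          have : st.2.1 = some "" := (eq_of_beq hc).symm
          simp [pvFinalA, this]
        · rw [if_neg hc]; simp [pvFinalA]
      constructor
      · rw [hfoldA, hAnew, hBnew, hBsame, ihe]
      · intro s v hv
        rw [hBnew, hBsame] at hv
        have := ihb s v hv
        have : v ≤ (xs.length : Int) := this
        simp; omega
    · -- truthy label a
      have key : (pvFinalA (pvStepA st a)).foldl pvMaxIns PySem.Dict.empty
          = dB.insert a ((xs.length : Int) + 1) := by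
        unfold pvStepA
        by_cases hc : (some a == st.2.1) = true
        · -- same run: previous record (a, n) is replaced by (a, n+1)
          rw [if_pos hc]
          have hpa : st.2.1 = some a := (eq_of_beq hc).symm
          set D := st.2.2.foldl pvMaxIns PySem.Dict.empty with hD
          have hold : dB = pvMaxIns D (a, st.1) := by
            rw [← ihe]; simp [pvFinalA, hpa, ha, List.foldl_append, hD]
          have hnew : (pvFinalA (st.1 + 1, st.2.1, st.2.2)).foldl pvMaxIns PySem.Dict.empty
              = pvMaxIns D (a, st.1 + 1) := by
            simp [pvFinalA, hpa, ha, List.foldl_append, hD]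
          rw [hnew, hold]
          unfold pvMaxIns
          cases hg : D.get? a with
          | none => simp [hfst, PySem.Dict.insert_insert_self]
          | some old =>
            have hget : (D.insert a (max old st.1)).get? a = some (max old st.1) :=
              PySem.Dict.get?_insert_self D a (max old st.1)
            have hb : max old st.1 ≤ (xs.length : Int) := by
              apply ihb a
              rw [hold]; unfold pvMaxIns; simp only [hg]; exact hget
            have hmax : max old ((xs.length : Int) + 1) = (xs.length : Int) + 1 := by
              have := le_max_left old st.1; omega
            simp [hfst, PySem.Dict.insert_insert_self, hmax]
        · -- new run: record appended after the full old record list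
          rw [if_neg hc]
          set L := pvFinalA st with hL
          have hLa : pvFinalA (st.1 + 1, some a, L) = L ++ [(a, st.1 + 1)] := by
            simp [pvFinalA, ha]
          have : (pvFinalA (st.1 + 1, some a, L)).foldl pvMaxIns PySem.Dict.empty
              = pvMaxIns dB (a, st.1 + 1) := by
            rw [hLa, List.foldl_append, ihe]; rfl
          rw [this]
          unfold pvMaxIns
          cases hg : dB.get? a with
          | none => simp [hfst]
          | some old =>
            have hb : old ≤ (xs.length : Int) := ihb a old hg
            have hmax : max old ((xs.length : Int) + 1) = (xs.length : Int) + 1 := by omega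
            simp [hfst, hmax]
      constructor
      · rw [hfoldA, key, hBnew]
        simp [pvStepB, ha]
        congr 1; omega
      · intro s v hv
        rw [hBnew] at hv
        simp only [pvStepB, if_pos (by simpa using ha)] at hv
        by_cases hs : s = a
        · subst hs
          rw [PySem.Dict.get?_insert_self] at hv
          simp at hv ⊢; omega
        · rw [PySem.Dict.get?_insert_of_ne dB _ hs] at hv
          have := ihb s v hv
          simp; omega

-- ===== VERDICT (by name: the statement is the Claim_ definition above) =====
theorem calcular_tempos_finais_spec : Claim_equal_calcular_tempos_finais := by
  intro l _
  unfold Spec_calcular_tempos_finais calcular_tempos_finais calcular_tempos_finais_alt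
  simp only [(pv_main l).1]
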